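-- pv_equiv track=rewrite | github.com/vadupdawg/NOA | worker_service/worker_service.py | parse_action_list
-- ===== SOURCE A (Python) =====
-- def parse_action_list(action_list_text):
-- # Functie om de actielijst te parsen en om te zetten in een lijst van dictionaries
--     lines = action_list_text.split('\n')
--     action_items = []
--     temp_item = {}
--     for line in lines:
--         if '-Actiepunt:' in line:
--             if temp_item:
--                 action_items.append(temp_item)
--                 temp_item = {}
--             temp_item['Actiepunt'] = line.split('-Actiepunt:', 1)[-1].strip()
--         elif '-Onderwerp:' in line:
--             temp_item['Onderwerp'] = line.split('-Onderwerp:', 1)[-1].strip()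
--         elif '-Context:' in line:
--             temp_item['Context'] = line.split('-Context:', 1)[-1].strip()
--         elif '-Verantwoordelijke:' in line:
--             temp_item['Verantwoordelijke'] = line.split('-Verantwoordelijke:', 1)[-1].strip()
--
--     # Voeg het laatste item toe als het niet leeg is
--     if temp_item:
--         action_items.append(temp_item)
--
--     return action_items
-- ===== SOURCE B (Python) =====
-- def parse_action_list(action_list_text):
--     # Two-phase: first split lines into groups starting at each '-Actiepunt:' line
--     # (lines before the first one form a leading group), then turn each group
--     # into a dict by scanning for the markers; empty dicts are skipped.
--     lines = action_list_text.split('\n')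
--     groups = []
--     current = []
--     for line in lines:
--         if '-Actiepunt:' in line:
--             groups.append(current)
--             current = [line]
--         else:
--             current.append(line)
--     groups.append(current)
--
--     markers = [('Actiepunt', '-Actiepunt:'),
--                ('Onderwerp', '-Onderwerp:'),
--                ('Context', '-Context:'),
--                ('Verantwoordelijke', '-Verantwoordelijke:')]
--     result = []
--     for g in groups:
--         d = {}
--         for line in g:
--             for key, marker in markers:
--                 if marker in line:
--                     d[key] = line.split(marker, 1)[-1].strip()
--                     break
--         if d:
--             result.append(d)
--     return result
-- ===== Notes on version B (the rewrite author's own statement) =====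
-- stated objective: alternative
-- what changed: Replaces A's single-pass flush-and-reset state machine with a two-phase structure: first partition the lines into groups starting at each '-Actiepunt:' line (lines before the first one form a leading group), then map each group to a dict by scanning for the four markers and collect the non-empty dicts.
import Mathlib
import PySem

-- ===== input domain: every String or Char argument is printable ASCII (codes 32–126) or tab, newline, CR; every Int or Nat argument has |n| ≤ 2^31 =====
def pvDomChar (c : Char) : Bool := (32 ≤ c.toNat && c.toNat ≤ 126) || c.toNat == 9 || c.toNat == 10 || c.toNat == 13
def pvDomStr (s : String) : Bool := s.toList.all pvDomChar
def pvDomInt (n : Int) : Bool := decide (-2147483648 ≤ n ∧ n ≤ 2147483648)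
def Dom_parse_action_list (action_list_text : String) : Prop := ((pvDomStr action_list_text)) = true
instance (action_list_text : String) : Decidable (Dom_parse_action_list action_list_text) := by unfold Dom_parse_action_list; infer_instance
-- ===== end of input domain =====

-- B replaces A's in-loop flush-and-reset state machine by a two-phase structure
-- (group the lines at each '-Actiepunt:' line, then map each group to a dict);
-- objective: alternative decomposition, same cost.

-- ===== PORT A =====
-- shared helper: line.split(marker, 1)[-1].strip(); the getD defaults are dead code:
-- splitMax? is none only for sep = "" and its result is never empty, as in Python.
def pvAfter (line marker : String) : String :=
  PySem.Str.strip ((PySem.List.pyGet? ((PySem.Str.splitMax? line marker 1).getD []) (-1)).getD "")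

-- the body of A's for-loop: state = (action_items, temp_item)
def pvStepA (st : List (PySem.Dict String String) × PySem.Dict String String)
    (line : String) : List (PySem.Dict String String) × PySem.Dict String String :=
  if PySem.Str.isIn "-Actiepunt:" line then
    let action_items := if st.2.items = [] then st.1 else st.1 ++ [st.2]
    (action_items, (PySem.Dict.empty).insert "Actiepunt" (pvAfter line "-Actiepunt:"))
  else if PySem.Str.isIn "-Onderwerp:" line then
    (st.1, st.2.insert "Onderwerp" (pvAfter line "-Onderwerp:"))
  else if PySem.Str.isIn "-Context:" line then
    (st.1, st.2.insert "Context" (pvAfter line "-Context:"))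
  else if PySem.Str.isIn "-Verantwoordelijke:" line then
    (st.1, st.2.insert "Verantwoordelijke" (pvAfter line "-Verantwoordelijke:"))
  else st

def parse_action_list (action_list_text : String) : List (List (String × String)) :=
  let lines := (PySem.Str.split? action_list_text "\n").getD []
  let st := lines.foldl pvStepA ([], PySem.Dict.empty)
  let action_items := if st.2.items = [] then st.1 else st.1 ++ [st.2]
  action_items.map (·.items)

-- ===== PORT B =====
def pvMarkers : List (String × String) :=
  [("Actiepunt", "-Actiepunt:"), ("Onderwerp", "-Onderwerp:"),
   ("Context", "-Context:"), ("Verantwoordelijke", "-Verantwoordelijke:")]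

-- B's inner 'for key, marker in markers: … break' loop
def pvApplyFirst : List (String × String) → PySem.Dict String String → String →
    PySem.Dict String String
  | [], d, _ => d
  | (key, marker) :: ms, d, line =>
    if PySem.Str.isIn marker line then d.insert key (pvAfter line marker)
    else pvApplyFirst ms d line

-- phase-1 step: state = (groups, current)
def pvStepG (st : List (List String) × List String) (line : String) :
    List (List String) × List String :=
  if PySem.Str.isIn "-Actiepunt:" line then (st.1 ++ [st.2], [line])
  else (st.1, st.2 ++ [line])

-- phase 2: 'for line in g: …' builds the group's dict
def pvGroupDict (g : List String) : PySem.Dict String String :=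
  g.foldl (fun d line => pvApplyFirst pvMarkers d line) PySem.Dict.empty

-- phase-2 step over the groups ('if d: result.append(d)')
def pvStepP (res : List (PySem.Dict String String)) (g : List String) :
    List (PySem.Dict String String) :=
  if (pvGroupDict g).items = [] then res else res ++ [pvGroupDict g]

def parse_action_list_alt (action_list_text : String) : List (List (String × String)) :=
  let lines := (PySem.Str.split? action_list_text "\n").getD []
  let st := lines.foldl pvStepG ([], [])
  let groups := st.1 ++ [st.2]
  let result := groups.foldl pvStepP []
  result.map (·.items)

-- ===== PRECONDITION & SPEC =====
def Spec_parse_action_list (action_list_text : String) (out : List (List (String × String))) : Prop := out = parse_action_list_alt action_list_text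
instance (action_list_text : String) (out : List (List (String × String))) : Decidable (Spec_parse_action_list action_list_text out) := by unfold Spec_parse_action_list; infer_instance

-- ===== CLAIM (what is proved, stated in full; the proofs are below) =====
def Claim_equal_parse_action_list : Prop := ∀ (action_list_text : String), Dom_parse_action_list action_list_text → Spec_parse_action_list action_list_text (parse_action_list action_list_text)

-- ===== LEMMAS AND PROOFS =====

-- phase-1 accumulator shift
lemma pv_gshift (ls : List String) : ∀ (gs : List (List String)) (cur : List String),
    List.foldl pvStepG (gs, cur) ls =
      (gs ++ (List.foldl pvStepG ([], cur) ls).1, (List.foldl pvStepG ([], cur) ls).2) := by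
  induction ls with
  | nil => intro gs cur; simp
  | cons l ls ih =>
    intro gs cur
    by_cases h : PySem.Str.isIn "-Actiepunt:" l = true
    · simp only [List.foldl_cons, pvStepG, if_pos h]
      rw [ih (gs ++ [cur]) [l], ih ([] ++ [cur]) [l]]
      simp
    · simp only [List.foldl_cons, pvStepG, if_neg h]
      exact ih gs (cur ++ [l])

-- phase-2 accumulator shift
lemma pv_pshift (gs : List (List String)) : ∀ (res : List (PySem.Dict String String)),
    List.foldl pvStepP res gs = res ++ List.foldl pvStepP [] gs := by
  induction gs with
  | nil => intro res; simp
  | cons g gs ih =>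
    intro res
    simp only [List.foldl_cons, pvStepP]
    by_cases h : (pvGroupDict g).items = []
    · rw [if_pos h, if_pos h]; exact ih res
    · rw [if_neg h, if_neg h, ih (res ++ [pvGroupDict g]), ih ([] ++ [pvGroupDict g])]
      simp
-- on a line with '-Actiepunt:', A flushes and restarts; the restarted dict is B's dict of [l]
lemma pv_stepA_act (items : List (PySem.Dict String String)) (d : PySem.Dict String String)
    (l : String) (h : PySem.Str.isIn "-Actiepunt:" l = true) :
    pvStepA (items, d) l =
      ((if d.items = [] then items else items ++ [d]), pvGroupDict [l]) := by
  simp only [pvStepA, if_pos h, pvGroupDict, List.foldl_cons, List.foldl_nil,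
    pvApplyFirst, pvMarkers]

-- on a line without '-Actiepunt:', A's elif chain is exactly B's marker scan
lemma pv_stepA_no_act (items : List (PySem.Dict String String)) (d : PySem.Dict String String)
    (l : String) (h : ¬ PySem.Str.isIn "-Actiepunt:" l = true) :
    pvStepA (items, d) l = (items, pvApplyFirst pvMarkers d l) := by
  simp only [pvStepA, pvApplyFirst, pvMarkers, if_neg h]
  split_ifs <;> rfl

lemma pv_groupDict_append (cur : List String) (l : String) :
    pvGroupDict (cur ++ [l]) = pvApplyFirst pvMarkers (pvGroupDict cur) l := by
  simp [pvGroupDict]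

-- main invariant: A's loop started at (items, dict-of-current-group), then flushed,
-- equals items ++ phase 2 applied to the groups B builds from here
lemma pv_main (ls : List String) : ∀ (items : List (PySem.Dict String String))
    (cur : List String),
    (if (List.foldl pvStepA (items, pvGroupDict cur) ls).2.items = []
     then (List.foldl pvStepA (items, pvGroupDict cur) ls).1
     else (List.foldl pvStepA (items, pvGroupDict cur) ls).1
          ++ [(List.foldl pvStepA (items, pvGroupDict cur) ls).2]) =
      items ++ List.foldl pvStepP []
        ((List.foldl pvStepG ([], cur) ls).1 ++ [(List.foldl pvStepG ([], cur) ls).2]) := by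
  induction ls with
  | nil =>
    intro items cur
    simp only [List.foldl_nil, List.nil_append, List.foldl_cons, pvStepP]
    by_cases h : (pvGroupDict cur).items = [] <;> simp [h]
  | cons l ls ih =>
    intro items cur
    by_cases h : PySem.Str.isIn "-Actiepunt:" l = true
    · simp only [List.foldl_cons, pv_stepA_act _ _ _ h]
      simp only [pvStepG, if_pos h]
      rw [ih ((if (pvGroupDict cur).items = [] then items else items ++ [pvGroupDict cur])) [l]]
      rw [pv_gshift ls ([] ++ [cur]) [l]]
      simp only [List.nil_append, List.cons_append]
      rw [show ∀ (gs : List (List String)),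
            List.foldl pvStepP [] (cur :: gs) = List.foldl pvStepP (pvStepP [] cur) gs
          from fun _ => rfl]
      rw [pv_pshift]
      simp only [pvStepP]
      by_cases he : (pvGroupDict cur).items = []
      · rw [if_pos he, if_pos he]; simp
      · rw [if_neg he, if_neg he]
        simp only [List.nil_append]
        rw [pv_pshift _ [pvGroupDict cur]]
        by_cases h2 : (pvGroupDict (List.foldl pvStepG ([], [l]) ls).2).items = [] <;>
          simp [pvStepP, h2]
    · simp only [List.foldl_cons, pv_stepA_no_act _ _ _ h, ← pv_groupDict_append]
      simp only [pvStepG, if_neg h]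
      exact ih items (cur ++ [l])

-- ===== VERDICT (by name: the statement is the Claim_ definition above) =====
theorem parse_action_list_spec : Claim_equal_parse_action_list := by
  intro s _
  show parse_action_list s = parse_action_list_alt s
  unfold parse_action_list parse_action_list_alt
  have h := pv_main ((PySem.Str.split? s "\n").getD []) [] []
  simp only [pvGroupDict, List.foldl_nil] at h
  simp only [h, List.nil_append]
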